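-- pv_equiv track=rewrite | github.com/Sarcarean/sarcarean.github.io | CS260/PythonTestCode/PythonTestCode.py | hasher
-- ===== SOURCE A (Python) =====
-- def hasher(product_id, table_size):
--     output = 0xFFFF
--     for i in range(0, len(product_id)):
--         output ^= ord(product_id[i]) << 8
--         for j in range(0,8):
--             if (output & 0x8000) > 0:
--                 output =(output << 1) ^ 0x1021
--             else:
--                 output = output << 1
--     return (output & 0xFFFF)%table_size
-- ===== SOURCE B (Python) =====
-- # Table-driven CRC-16-CCITT (poly 0x1021, init 0xFFFF): 256-entry table built once,
-- # then one lookup per character instead of A's inner 8-step bit loop.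
-- _CRC_TABLE = []
-- for _i in range(256):
--     _crc = _i << 8
--     for _ in range(8):
--         _crc = ((_crc << 1) ^ 0x1021) if (_crc & 0x8000) else (_crc << 1)
--     _CRC_TABLE.append(_crc & 0xFFFF)
--
-- def hasher(product_id, table_size):
--     crc = 0xFFFF
--     for ch in product_id:
--         crc = ((crc << 8) & 0xFFFF) ^ _CRC_TABLE[((crc >> 8) ^ ord(ch)) & 0xFF]
--     return crc % table_size
-- ===== Notes on version B (the rewrite author's own statement) =====
-- stated objective: faster
-- what changed: Replaces A's per-character inner 8-iteration bit loop with the classic table-driven CRC-16-CCITT: a 256-entry table is precomputed once and each character costs a single lookup/xor/shift.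
import Mathlib
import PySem

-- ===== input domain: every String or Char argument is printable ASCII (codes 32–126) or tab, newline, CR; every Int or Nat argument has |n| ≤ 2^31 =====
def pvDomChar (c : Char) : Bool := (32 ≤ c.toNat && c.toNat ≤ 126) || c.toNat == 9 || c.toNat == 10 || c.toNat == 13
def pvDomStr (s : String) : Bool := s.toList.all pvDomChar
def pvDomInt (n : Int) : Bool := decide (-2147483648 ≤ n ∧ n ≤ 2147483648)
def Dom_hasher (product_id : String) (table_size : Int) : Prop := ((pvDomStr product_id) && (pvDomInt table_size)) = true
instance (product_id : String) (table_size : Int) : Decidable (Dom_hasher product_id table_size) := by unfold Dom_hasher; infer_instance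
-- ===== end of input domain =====

-- B replaces A's per-character inner 8-step bit loop by the classic table-driven
-- CRC-16-CCITT (256-entry table built once, one lookup per character); same return value.

-- ===== PORT A =====
-- A's inner 'for j in range(0,8)' body
def hasherBitStep (o : Nat) : Nat :=
  if o &&& 0x8000 > 0 then (o <<< 1) ^^^ 0x1021 else o <<< 1

-- A's outer loop body: 'output ^= ord(c) << 8' then 8 bit steps
def hasherChar (o : Nat) (c : Char) : Nat :=
  (List.range 8).foldl (fun acc _ => hasherBitStep acc) (o ^^^ (c.toNat <<< 8))

def hasher (product_id : String) (table_size : Int) : Int :=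
  let output : Nat := product_id.toList.foldl hasherChar 0xFFFF
  PySem.Int.mod ((output &&& 0xFFFF : Nat) : Int) table_size

-- ===== PORT B =====
-- the module-level table: _CRC_TABLE[i] = 8 bit steps on i<<8, masked
def crcTable : List Nat :=
  (List.range 256).map (fun i =>
    ((List.range 8).foldl
      (fun c _ => if c &&& 0x8000 > 0 then (c <<< 1) ^^^ 0x1021 else c <<< 1)
      (i <<< 8)) &&& 0xFFFF)

-- B's loop body: one table lookup per character
def hasherAltStep (crc : Nat) (ch : Char) : Nat :=
  ((crc <<< 8) &&& 0xFFFF) ^^^ crcTable.getD (((crc >>> 8) ^^^ ch.toNat) &&& 0xFF) 0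

def hasher_alt (product_id : String) (table_size : Int) : Int :=
  PySem.Int.mod ((product_id.toList.foldl hasherAltStep 0xFFFF : Nat) : Int) table_size

-- ===== PRECONDITION & SPEC =====
-- Pre_ excludes only table_size = 0, where A (and B) raise ZeroDivisionError.
def Pre_hasher (product_id : String) (table_size : Int) : Prop := table_size ≠ 0
instance (product_id : String) (table_size : Int) : Decidable (Pre_hasher product_id table_size) := by
  unfold Pre_hasher; infer_instance

def pvWitness_hasher : String × Int := ("AB-12", 17)

def Spec_hasher (product_id : String) (table_size : Int) (out : Int) : Prop := out = hasher_alt product_id table_size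
instance (product_id : String) (table_size : Int) (out : Int) : Decidable (Spec_hasher product_id table_size out) := by unfold Spec_hasher; infer_instance

-- ===== CLAIM (what is proved, stated in full; the proofs are below) =====
def Claim_equal_hasher : Prop := ∀ (product_id : String) (table_size : Int), Dom_hasher product_id table_size → Pre_hasher product_id table_size → Spec_hasher product_id table_size (hasher product_id table_size)

-- ===== LEMMAS AND PROOFS =====

-- n-fold application of the bit step (proof-side view of both inner loops)
def iterStep : Nat → Nat → Nat
  | 0, o => o
  | n + 1, o => iterStep n (hasherBitStep o)

theorem foldRange_eq_iterStep (n : Nat) (o : Nat) :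
    (List.range n).foldl (fun acc _ => hasherBitStep acc) o = iterStep n o := by
  induction n generalizing o with
  | zero => rfl
  | succ k ih =>
    rw [List.range_succ_eq_map]
    simp only [List.foldl_cons, List.foldl_map]
    exact ih (hasherBitStep o)

theorem and_msb_pos_iff (x : Nat) : (x &&& 0x8000 > 0) ↔ x.testBit 15 = true := by
  rw [show (0x8000 : Nat) = 2 ^ 15 from rfl, Nat.and_two_pow]
  cases x.testBit 15 <;> simp

theorem step_linear (a b : Nat) :
    hasherBitStep (a ^^^ b) = hasherBitStep a ^^^ hasherBitStep b := by
  unfold hasherBitStep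
  have hxor : (a ^^^ b).testBit 15 = (a.testBit 15 != b.testBit 15) := Nat.testBit_xor ..
  by_cases ha : a.testBit 15 = true <;> by_cases hb : b.testBit 15 = true <;>
    simp only [and_msb_pos_iff, hxor, ha, hb] <;>
    simp [Nat.shiftLeft_xor_distrib, Nat.xor_assoc, Nat.xor_comm, Nat.xor_left_comm]

theorem iterStep_linear (n a b : Nat) :
    iterStep n (a ^^^ b) = iterStep n a ^^^ iterStep n b := by
  induction n generalizing a b with
  | zero => rfl
  | succ k ih => simp only [iterStep, step_linear, ih]

theorem and_mask_assoc (o : Nat) : o &&& 0xFFFF &&& 0x8000 = o &&& 0x8000 := by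
  rw [Nat.and_assoc]
  have h : (0xFFFF &&& 0x8000 : Nat) = 0x8000 := by decide
  rw [h]

theorem step_mask (o : Nat) :
    hasherBitStep o &&& 0xFFFF = hasherBitStep (o &&& 0xFFFF) &&& 0xFFFF := by
  unfold hasherBitStep
  rw [and_mask_assoc]
  have hsh : (o <<< 1) &&& 0xFFFF = ((o &&& 0xFFFF) <<< 1) &&& 0xFFFF := by
    rw [show ((0xFFFF : Nat) = 2 ^ 16 - 1) from rfl, Nat.and_two_pow_sub_one_eq_mod,
        Nat.and_two_pow_sub_one_eq_mod, Nat.and_two_pow_sub_one_eq_mod,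
        Nat.shiftLeft_eq, Nat.shiftLeft_eq]
    omega
  split_ifs with h
  · rw [Nat.and_xor_distrib_right, Nat.and_xor_distrib_right, hsh]
  · exact hsh

theorem iterStep_mask (n o : Nat) :
    iterStep n o &&& 0xFFFF = iterStep n (o &&& 0xFFFF) &&& 0xFFFF := by
  induction n generalizing o with
  | zero => simp [iterStep]
  | succ k ih =>
    show iterStep k (hasherBitStep o) &&& 0xFFFF
        = iterStep k (hasherBitStep (o &&& 0xFFFF)) &&& 0xFFFF
    calc iterStep k (hasherBitStep o) &&& 0xFFFF
        = iterStep k (hasherBitStep o &&& 0xFFFF) &&& 0xFFFF := ih _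
      _ = iterStep k (hasherBitStep (o &&& 0xFFFF) &&& 0xFFFF) &&& 0xFFFF := by
          rw [step_mask o]
      _ = iterStep k (hasherBitStep (o &&& 0xFFFF)) &&& 0xFFFF := (ih _).symm

theorem step_small (o : Nat) (h : ¬ o.testBit 15 = true) : hasherBitStep o = o <<< 1 := by
  unfold hasherBitStep
  rw [if_neg]
  rw [and_msb_pos_iff]
  exact h

theorem iterStep_shift (n : Nat) : ∀ o : Nat, o * 2 ^ n < 2 ^ 16 → iterStep n o = o <<< n := by
  induction n with
  | zero => intro o _; simp [iterStep]
  | succ k ih =>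
    intro o h
    have h15 : o < 2 ^ 15 := by
      have h2 : 2 * 2 ^ k ≤ 2 ^ (k + 1) := by rw [pow_succ]; omega
      nlinarith [Nat.one_le_two_pow (n := k)]
    have hbit : ¬ o.testBit 15 = true := by
      simp [Nat.testBit_lt_two_pow h15]
    show iterStep k (hasherBitStep o) = o <<< (k + 1)
    rw [step_small o hbit, ih (o <<< 1) (by rw [Nat.shiftLeft_eq]; rw [pow_succ] at h; nlinarith),
        ← Nat.shiftLeft_add]
    rw [Nat.add_comm]

theorem xor_highpart (m : Nat) : m ^^^ ((m >>> 8) <<< 8) = m &&& 0xFF := by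
  apply Nat.eq_of_testBit_eq
  intro i
  rw [Nat.testBit_xor, Nat.testBit_and, Nat.testBit_shiftLeft, Nat.testBit_shiftRight]
  by_cases hi : 8 ≤ i
  · have : 8 + (i - 8) = i := by omega
    rw [this]
    have : (0xFF : Nat).testBit i = false := by
      have : (0xFF : Nat) < 2 ^ i := by
        calc (0xFF : Nat) < 2 ^ 8 := by norm_num
        _ ≤ 2 ^ i := Nat.pow_le_pow_right (by norm_num) hi
      exact Nat.testBit_lt_two_pow this
    simp [hi, this]
  · have : (0xFF : Nat).testBit i = true := by
      interval_cases i <;> decide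
    simp [hi, this]

theorem and_mask16_lt (o : Nat) : o &&& 0xFFFF < 65536 := by
  rw [show ((0xFFFF : Nat) = 2 ^ 16 - 1) from rfl, Nat.and_two_pow_sub_one_eq_mod]
  exact Nat.mod_lt _ (by norm_num)

theorem and_mask8_lt (o : Nat) : o &&& 0xFF < 256 := by
  rw [show ((0xFF : Nat) = 2 ^ 8 - 1) from rfl, Nat.and_two_pow_sub_one_eq_mod]
  exact Nat.mod_lt _ (by norm_num)

theorem and_mask_of_lt {o : Nat} (h : o < 65536) : o &&& 0xFFFF = o := by
  rw [show ((0xFFFF : Nat) = 2 ^ 16 - 1) from rfl, Nat.and_two_pow_sub_one_eq_mod]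
  exact Nat.mod_eq_of_lt h

theorem and_mask8_of_lt {o : Nat} (h : o < 256) : o &&& 0xFF = o := by
  rw [show ((0xFF : Nat) = 2 ^ 8 - 1) from rfl, Nat.and_two_pow_sub_one_eq_mod]
  exact Nat.mod_eq_of_lt h

theorem crcTable_getD (j : Nat) (h : j < 256) :
    crcTable.getD j 0 = iterStep 8 (j <<< 8) &&& 0xFFFF := by
  unfold crcTable
  rw [List.getD_eq_getElem?_getD, List.getElem?_map, List.getElem?_range h]
  simp only [Option.map_some, Option.getD_some]
  show ((List.range 8).foldl (fun acc _ => hasherBitStep acc) (j <<< 8)) &&& 0xFFFF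
      = iterStep 8 (j <<< 8) &&& 0xFFFF
  rw [foldRange_eq_iterStep]

theorem shl16_mask (h : Nat) : (h <<< 16) &&& 0xFFFF = 0 := by
  rw [show ((0xFFFF : Nat) = 2 ^ 16 - 1) from rfl, Nat.and_two_pow_sub_one_eq_mod,
      Nat.shiftLeft_eq, Nat.mul_mod_left]

-- the per-character equivalence: A's masked step equals B's table step
theorem char_step_eq (o : Nat) (c : Char) (hc : c.toNat < 256) :
    hasherChar o c &&& 0xFFFF = hasherAltStep (o &&& 0xFFFF) c := by
  unfold hasherChar hasherAltStep
  rw [foldRange_eq_iterStep]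
  set m := o &&& 0xFFFF with hm
  have hmlt : m < 65536 := and_mask16_lt o
  have hhi : m >>> 8 < 256 := by
    rw [Nat.shiftRight_eq_div_pow]
    omega
  have hidx : (m >>> 8) ^^^ c.toNat < 256 := Nat.xor_lt_two_pow (n := 8) hhi hc
  rw [and_mask8_of_lt hidx, crcTable_getD _ hidx]
  -- mask A's input first
  have hcshift : c.toNat <<< 8 < 65536 := by rw [Nat.shiftLeft_eq]; omega
  have hin : (o ^^^ c.toNat <<< 8) &&& 0xFFFF = m ^^^ c.toNat <<< 8 := by
    rw [Nat.and_xor_distrib_right, ← hm, and_mask_of_lt hcshift]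
  rw [iterStep_mask, hin]
  -- linearity on both sides
  rw [iterStep_linear, Nat.shiftLeft_xor_distrib, iterStep_linear]
  rw [Nat.and_xor_distrib_right, Nat.and_xor_distrib_right]
  -- reduce to the m-only identity, cancelling the common c term
  have hkey : iterStep 8 m &&& 0xFFFF
      = ((m <<< 8) &&& 0xFFFF) ^^^ (iterStep 8 ((m >>> 8) <<< 8) &&& 0xFFFF) := by
    have hdecomp : m = ((m >>> 8) <<< 8) ^^^ (m ^^^ ((m >>> 8) <<< 8)) := by
      conv_rhs => rw [Nat.xor_comm m ((m >>> 8) <<< 8), ← Nat.xor_assoc,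
        Nat.xor_self, Nat.zero_xor]
    have hlo : m ^^^ ((m >>> 8) <<< 8) = m &&& 0xFF := xor_highpart m
    have hlolt : m &&& 0xFF < 256 := and_mask8_lt m
    calc iterStep 8 m &&& 0xFFFF
        = iterStep 8 (((m >>> 8) <<< 8) ^^^ (m &&& 0xFF)) &&& 0xFFFF := by
          rw [← hlo, ← hdecomp]
      _ = (iterStep 8 ((m >>> 8) <<< 8) ^^^ iterStep 8 (m &&& 0xFF)) &&& 0xFFFF := by
          rw [iterStep_linear]
      _ = (iterStep 8 ((m >>> 8) <<< 8) ^^^ (m &&& 0xFF) <<< 8) &&& 0xFFFF := by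
          rw [iterStep_shift 8 (m &&& 0xFF) (by rw [show (2:Nat)^8 = 256 from rfl]; nlinarith)]
      _ = (iterStep 8 ((m >>> 8) <<< 8) &&& 0xFFFF) ^^^ (((m &&& 0xFF) <<< 8) &&& 0xFFFF) := by
          rw [Nat.and_xor_distrib_right]
      _ = (iterStep 8 ((m >>> 8) <<< 8) &&& 0xFFFF) ^^^ ((m <<< 8) &&& 0xFFFF) := by
          congr 1
          rw [← hlo, Nat.shiftLeft_xor_distrib, ← Nat.shiftLeft_add,
              Nat.and_xor_distrib_right, Nat.xor_comm]
          rw [show (8 + 8 : Nat) = 16 from rfl, shl16_mask, Nat.zero_xor]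
      _ = ((m <<< 8) &&& 0xFFFF) ^^^ (iterStep 8 ((m >>> 8) <<< 8) &&& 0xFFFF) := by
          rw [Nat.xor_comm]
  rw [hkey, Nat.xor_assoc]

-- Dom gives every character a code < 256
theorem dom_char_lt {s : String} (hs : pvDomStr s = true) :
    ∀ c ∈ s.toList, c.toNat < 256 := by
  intro c hc
  have := (List.all_eq_true.mp hs) c hc
  unfold pvDomChar at this
  simp only [Bool.or_eq_true, Bool.and_eq_true, decide_eq_true_eq, beq_iff_eq] at this
  omega

-- fold invariant: B's state is A's state masked
theorem fold_invariant (cs : List Char) (hc : ∀ c ∈ cs, c.toNat < 256) :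
    ∀ o : Nat, cs.foldl hasherAltStep (o &&& 0xFFFF) = (cs.foldl hasherChar o) &&& 0xFFFF := by
  induction cs with
  | nil => intro o; rfl
  | cons c cs ih =>
    intro o
    simp only [List.foldl_cons]
    rw [← char_step_eq o c (hc c (by simp))]
    exact ih (fun c h => hc c (by simp [h])) (hasherChar o c)

-- ===== VERDICT (by name: the statement is the Claim_ definition above) =====
theorem hasher_spec : Claim_equal_hasher := by
  intro product_id table_size hdom _hpre
  unfold Spec_hasher hasher hasher_alt
  have hs : pvDomStr product_id = true := by
    unfold Dom_hasher at hdom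
    simp only [Bool.and_eq_true] at hdom
    exact hdom.1
  have h := fold_invariant product_id.toList (dom_char_lt hs) 0xFFFF
  rw [show ((0xFFFF : Nat) &&& 0xFFFF) = 0xFFFF from rfl] at h
  rw [h]
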